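-- pv_equiv track=rewrite | github.com/cirosantilli/project-euler-solutions | solvers/989.py | reduced_pair_count
-- ===== SOURCE A (Python) =====
-- from math import gcd, isqrt
--
-- def reduced_pair_count(n: int) -> int:
--     count: int = 0
--     max_a: int = 2 * isqrt(n) + 2
--     for a in range(2, max_a + 1):
--         for b in range(1, a // 2 + 1):
--             if gcd(a, b) != 1:
--                 continue
--             if a * a - a * b - b * b == n:
--                 count += 1
--     return count
-- ===== SOURCE B (Python) =====
-- from math import gcd, isqrt
--
-- def reduced_pair_count(n: int) -> int:
--     count = 0
--     max_a = 2 * isqrt(n) + 2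
--     for a in range(2, max_a + 1):
--         disc = 5 * a * a - 4 * n
--         if disc < 0:
--             continue
--         s = isqrt(disc)
--         if s * s != disc:
--             continue
--         if (s - a) % 2 != 0:
--             continue
--         b = (s - a) // 2
--         if 1 <= b <= a // 2 and gcd(a, b) == 1:
--             count += 1
--     return count
-- ===== Notes on version B (the rewrite author's own statement) =====
-- stated objective: faster
-- what changed: Instead of scanning all b in [1, a//2] for every a (a full double loop), B solves the quadratic in b for each a: it checks whether the discriminant 5a^2-4n is a perfect square s^2 with s-a even, and tests the single candidate b=(s-a)//2 for range and coprimality.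
import Mathlib
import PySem

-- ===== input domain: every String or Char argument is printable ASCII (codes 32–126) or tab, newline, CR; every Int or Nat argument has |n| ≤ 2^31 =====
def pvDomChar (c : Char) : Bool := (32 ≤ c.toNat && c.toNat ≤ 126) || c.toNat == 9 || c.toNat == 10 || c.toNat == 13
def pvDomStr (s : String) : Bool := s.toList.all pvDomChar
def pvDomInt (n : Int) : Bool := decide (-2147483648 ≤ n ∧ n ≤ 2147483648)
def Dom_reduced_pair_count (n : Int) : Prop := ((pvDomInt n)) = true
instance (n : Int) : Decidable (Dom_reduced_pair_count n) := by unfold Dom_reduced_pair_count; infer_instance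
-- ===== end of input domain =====

-- B replaces A's inner scan over all b with a perfect-square test on the discriminant 5a^2-4n,
-- testing the single candidate root b = (s-a)//2 per a (objective: faster, measured).

-- ===== PORT A =====
-- math.isqrt(n) is ported as Int.sqrt, exact for 0 ≤ n (isqrt raises ValueError on n < 0; excluded by Pre_)
def reduced_pair_count (n : Int) : Int :=
  let max_a : Int := 2 * Int.sqrt n + 2
  (PySem.List.pyRange 2 (max_a + 1) 1).foldl (fun count a =>
    (PySem.List.pyRange 1 (PySem.Int.floordiv a 2 + 1) 1).foldl (fun count b =>
      if Int.gcd a b ≠ 1 then count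
      else if a * a - a * b - b * b = n then count + 1 else count) count) 0

-- ===== PORT B =====
def reduced_pair_count_alt (n : Int) : Int :=
  let max_a : Int := 2 * Int.sqrt n + 2
  (PySem.List.pyRange 2 (max_a + 1) 1).foldl (fun count a =>
    let disc := 5 * a * a - 4 * n
    if disc < 0 then count
    else
      let s := Int.sqrt disc
      if s * s ≠ disc then count
      else if PySem.Int.mod (s - a) 2 ≠ 0 then count
      else
        let b := PySem.Int.floordiv (s - a) 2
        if 1 ≤ b ∧ b ≤ PySem.Int.floordiv a 2 ∧ Int.gcd a b = 1 then count + 1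
        else count) 0

-- ===== PRECONDITION & SPEC =====
-- Pre_ excludes n < 0, on which Python's math.isqrt(n) raises ValueError (A returns no value there).
def Pre_reduced_pair_count (n : Int) : Prop := 0 ≤ n
instance (n : Int) : Decidable (Pre_reduced_pair_count n) := by unfold Pre_reduced_pair_count; infer_instance
def pvWitness_reduced_pair_count : Int := 11

def Spec_reduced_pair_count (n : Int) (out : Int) : Prop := out = reduced_pair_count_alt n
instance (n : Int) (out : Int) : Decidable (Spec_reduced_pair_count n out) := by unfold Spec_reduced_pair_count; infer_instance

-- ===== CLAIM (what is proved, stated in full; the proofs are below) =====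
def Claim_equal_reduced_pair_count : Prop := ∀ (n : Int), Dom_reduced_pair_count n → Pre_reduced_pair_count n → Spec_reduced_pair_count n (reduced_pair_count n)

-- ===== LEMMAS AND PROOFS =====

-- a counting fold with a guard is countP
lemma foldl_if_count (p : Int → Bool) (l : List Int) (c : Int) :
    l.foldl (fun c b => if p b then c + 1 else c) c = c + (l.countP p : Int) := by
  induction l generalizing c with
  | nil => simp
  | cons x t ih =>
    simp only [List.foldl_cons, List.countP_cons, ih]
    by_cases h : p x = true <;> simp [h] <;> ring

-- the equation a^2 - ab - b^2 = n is exactly "(a+2b)^2 equals the discriminant"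
lemma eq_iff_sq (n a b : Int) :
    a * a - a * b - b * b = n ↔ (a + 2 * b) * (a + 2 * b) = 5 * a * a - 4 * n := by
  constructor <;> intro h
  · linear_combination (-4 : Int) * h
  · have h4 : 4 * (a * a - a * b - b * b) = 4 * n := by linear_combination (-1 : Int) * h
    omega

lemma sqrt_of_sq (a b : Int) (h : 0 ≤ a + 2 * b) :
    Int.sqrt ((a + 2 * b) * (a + 2 * b)) = a + 2 * b := by
  rw [Int.sqrt_eq]
  omega

-- for 1 ≤ b, a solution b of the equation determines sqrt of the discriminant
lemma root_eq (n a b : Int) (ha : 2 ≤ a) (hb : 1 ≤ b)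
    (heq : a * a - a * b - b * b = n) :
    Int.sqrt (5 * a * a - 4 * n) = a + 2 * b := by
  have h2 := (eq_iff_sq n a b).mp heq
  rw [← h2]
  exact sqrt_of_sq a b (by omega)

-- the per-a inner scan of A counts exactly what B's discriminant test decides
lemma inner_count (n a : Int) (ha : 2 ≤ a) :
    ((PySem.List.pyRange 1 (PySem.Int.floordiv a 2 + 1) 1).countP
        (fun b => decide (Int.gcd a b = 1 ∧ a * a - a * b - b * b = n)) : Int)
    = (let disc := 5 * a * a - 4 * n
       if disc < 0 then 0
       else
         let s := Int.sqrt disc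
         if s * s ≠ disc then 0
         else if PySem.Int.mod (s - a) 2 ≠ 0 then 0
         else
           let b := PySem.Int.floordiv (s - a) 2
           if 1 ≤ b ∧ b ≤ PySem.Int.floordiv a 2 ∧ Int.gcd a b = 1 then 1 else 0) := by
  show ((PySem.List.pyRange 1 (PySem.Int.floordiv a 2 + 1) 1).countP
        (fun b => decide (Int.gcd a b = 1 ∧ a * a - a * b - b * b = n)) : Int)
    = (if 5 * a * a - 4 * n < 0 then 0
       else if Int.sqrt (5 * a * a - 4 * n) * Int.sqrt (5 * a * a - 4 * n) ≠ 5 * a * a - 4 * n then 0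
       else if PySem.Int.mod (Int.sqrt (5 * a * a - 4 * n) - a) 2 ≠ 0 then 0
       else if 1 ≤ PySem.Int.floordiv (Int.sqrt (5 * a * a - 4 * n) - a) 2 ∧
               PySem.Int.floordiv (Int.sqrt (5 * a * a - 4 * n) - a) 2 ≤ PySem.Int.floordiv a 2 ∧
               Int.gcd a (PySem.Int.floordiv (Int.sqrt (5 * a * a - 4 * n) - a) 2) = 1 then 1 else 0)
  set L := PySem.List.pyRange 1 (PySem.Int.floordiv a 2 + 1) 1 with hL
  have hmem : ∀ x ∈ L, 1 ≤ x ∧ x ≤ PySem.Int.floordiv a 2 := by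
    intro x hx
    have := PySem.List.mem_pyRange_one.mp (hL ▸ hx)
    omega
  by_cases h1 : 5 * a * a - 4 * n < 0
  · rw [if_pos h1]
    have hz : L.countP (fun b => decide (Int.gcd a b = 1 ∧ a * a - a * b - b * b = n)) = 0 := by
      rw [List.countP_eq_zero]
      intro b hb
      simp only [decide_eq_true_eq, not_and]
      intro _ heq
      have h2 := (eq_iff_sq n a b).mp heq
      have h3 := mul_self_nonneg (a + 2 * b)
      omega
    rw [hz]; rfl
  · rw [if_neg h1]
    by_cases h2 : Int.sqrt (5 * a * a - 4 * n) * Int.sqrt (5 * a * a - 4 * n) ≠ 5 * a * a - 4 * n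
    · rw [if_pos h2]
      have hz : L.countP (fun b => decide (Int.gcd a b = 1 ∧ a * a - a * b - b * b = n)) = 0 := by
        rw [List.countP_eq_zero]
        intro b hb
        simp only [decide_eq_true_eq, not_and]
        intro _ heq
        have hr := root_eq n a b ha (hmem b hb).1 heq
        have h4 := (eq_iff_sq n a b).mp heq
        rw [hr] at h2
        exact h2 h4
      rw [hz]; rfl
    · rw [if_neg h2]
      rw [not_not] at h2
      by_cases h3 : PySem.Int.mod (Int.sqrt (5 * a * a - 4 * n) - a) 2 ≠ 0
      · rw [if_pos h3]
        have hz : L.countP (fun b => decide (Int.gcd a b = 1 ∧ a * a - a * b - b * b = n)) = 0 := by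
          rw [List.countP_eq_zero]
          intro b hb
          simp only [decide_eq_true_eq, not_and]
          intro _ heq
          have hr := root_eq n a b ha (hmem b hb).1 heq
          rw [hr] at h3
          have : a + 2 * b - a = 2 * b := by ring
          rw [this] at h3
          exact h3 ((PySem.Int.mod_eq_zero_iff_dvd (2 * b) 2).mpr ⟨b, rfl⟩)
        rw [hz]; rfl
      · rw [if_neg h3]
        rw [not_not] at h3
        have hdvd : (2 : Int) ∣ (Int.sqrt (5 * a * a - 4 * n) - a) :=
          (PySem.Int.mod_eq_zero_iff_dvd _ 2).mp h3
        set b0 := PySem.Int.floordiv (Int.sqrt (5 * a * a - 4 * n) - a) 2 with hb0def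
        have hb0 : Int.sqrt (5 * a * a - 4 * n) = a + 2 * b0 := by
          rw [hb0def, PySem.Int.floordiv_eq_ediv_of_pos _]
          · omega
          · norm_num
        -- any counted b in L equals b0
        have huniq : ∀ b, 1 ≤ b → a * a - a * b - b * b = n → b = b0 := by
          intro b hb heq
          have hr := root_eq n a b ha hb heq
          omega
        by_cases hc : 1 ≤ b0 ∧ b0 ≤ PySem.Int.floordiv a 2 ∧ Int.gcd a b0 = 1
        · rw [if_pos hc]
          have hpb0 : a * a - a * b0 - b0 * b0 = n := by
            apply (eq_iff_sq n a b0).mpr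
            rw [← hb0]
            exact h2
          have hb0mem : b0 ∈ L := by
            rw [hL]
            exact PySem.List.mem_pyRange_one.mpr ⟨hc.1, by omega⟩
          have hcp : L.countP (fun b => decide (Int.gcd a b = 1 ∧ a * a - a * b - b * b = n))
              = L.countP (· == b0) := by
            apply List.countP_congr
            intro x hx
            by_cases hpx : Int.gcd a x = 1 ∧ a * a - a * x - x * x = n
            · have hx0 : x = b0 := huniq x (hmem x hx).1 hpx.2
              subst hx0
              simp [hpx.1, hpx.2]
            · have hx0 : x ≠ b0 := by
                intro he
                exact hpx (he ▸ ⟨hc.2.2, hpb0⟩)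
              simp [hx0]
              tauto
          have hnd : L.Nodup := hL ▸ PySem.List.nodup_pyRange_one 1 (PySem.Int.floordiv a 2 + 1)
          have : L.countP (· == b0) = L.count b0 := rfl
          rw [hcp, this, List.count_eq_one_of_mem hnd hb0mem]
          rfl
        · rw [if_neg hc]
          have hz : L.countP (fun b => decide (Int.gcd a b = 1 ∧ a * a - a * b - b * b = n)) = 0 := by
            rw [List.countP_eq_zero]
            intro b hb
            simp only [decide_eq_true_eq, not_and]
            intro hg heq
            have hx0 : b = b0 := huniq b (hmem b hb).1 heq
            exact hc ⟨hx0 ▸ (hmem b hb).1, hx0 ▸ (hmem b hb).2, hx0 ▸ hg⟩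
          rw [hz]; rfl

-- ===== VERDICT (by name: the statement is the Claim_ definition above) =====
theorem reduced_pair_count_spec : Claim_equal_reduced_pair_count := by
  intro n _ _
  unfold Spec_reduced_pair_count reduced_pair_count reduced_pair_count_alt
  apply PySem.List.foldl_congr_mem
  intro c a hmem
  have ha : 2 ≤ a := (PySem.List.mem_pyRange_one.mp hmem).1
  have hstep :
      (fun (c b : Int) => if Int.gcd a b ≠ 1 then c
        else if a * a - a * b - b * b = n then c + 1 else c)
      = (fun c b => if decide (Int.gcd a b = 1 ∧ a * a - a * b - b * b = n) then c + 1 else c) := by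
    funext c b
    by_cases h1 : Int.gcd a b = 1 <;> by_cases h2 : a * a - a * b - b * b = n <;> simp [h1, h2]
  rw [hstep, foldl_if_count, inner_count n a ha]
  simp only []
  split_ifs <;> simp
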